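-- pv_equiv track=rewrite | github.com/cheungrui/leetcode | 0030_Substring_With_Concatenation_Of_All_Words.py | isVaildWords
-- ===== SOURCE A (Python) =====
-- def isVaildWords(words):
--     """
--     检测words中的元素长度是否一致
--     """
--
--     if not words:
--         return True
--     word_len = len(words[0])
--     for word in words:
--         tmp_len = len(word)
--         if tmp_len != word_len:
--             return False
--     return True
-- ===== SOURCE B (Python) =====
-- def isVaildWords(words):
--     if not words:
--         return True
--     lens = [len(w) for w in words]
--     return min(lens) == max(lens)
-- ===== Notes on version B (the rewrite author's own statement) =====
-- stated objective: alternative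
-- what changed: B builds the list of word lengths and checks that its minimum equals its maximum, instead of A's early-exit scan comparing each length against the first word's length.
import Mathlib
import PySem

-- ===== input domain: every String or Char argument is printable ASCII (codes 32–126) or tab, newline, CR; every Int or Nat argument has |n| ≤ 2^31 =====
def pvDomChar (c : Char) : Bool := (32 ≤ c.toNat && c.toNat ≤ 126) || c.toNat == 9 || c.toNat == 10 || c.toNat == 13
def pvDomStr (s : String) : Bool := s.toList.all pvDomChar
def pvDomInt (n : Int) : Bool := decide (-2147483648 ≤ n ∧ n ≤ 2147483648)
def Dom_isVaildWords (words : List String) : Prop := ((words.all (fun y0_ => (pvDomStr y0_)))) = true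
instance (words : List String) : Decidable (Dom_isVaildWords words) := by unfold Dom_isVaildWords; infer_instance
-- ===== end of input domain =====

-- B computes the list of word lengths and checks min == max, instead of A's early-exit
-- scan comparing each length against the first word's length (alternative; same cost).


-- ===== PORT A =====
-- 'for word in words: if len(word) != word_len: return False'
def isVaildWordsLoop (wordLen : Int) : List String → Bool
  | [] => true
  | word :: rest =>
    let tmpLen := PySem.Str.len word
    if tmpLen ≠ wordLen then false else isVaildWordsLoop wordLen rest

def isVaildWords (words : List String) : Bool :=
  if words.isEmpty then true
  else isVaildWordsLoop (PySem.Str.len (words.headD "")) words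

-- ===== PORT B =====
-- 'lens = [len(w) for w in words]; return min(lens) == max(lens)'
def isVaildWords_alt (words : List String) : Bool :=
  if words.isEmpty then true
  else
    let lens := words.map PySem.Str.len
    decide (PySem.List.min? lens (fun x => x) = PySem.List.max? lens (fun x => x))

-- ===== PRECONDITION & SPEC =====
def Spec_isVaildWords (words : List String) (out : Bool) : Prop := out = isVaildWords_alt words
instance (words : List String) (out : Bool) : Decidable (Spec_isVaildWords words out) := by unfold Spec_isVaildWords; infer_instance

-- ===== CLAIM (what is proved, stated in full; the proofs are below) =====
def Claim_equal_isVaildWords : Prop := ∀ (words : List String), Dom_isVaildWords words → Spec_isVaildWords words (isVaildWords words)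

-- ===== LEMMAS AND PROOFS =====
theorem isVaildWordsLoop_iff (l : Int) (xs : List String) :
    isVaildWordsLoop l xs = true ↔ ∀ w ∈ xs, PySem.Str.len w = l := by
  induction xs with
  | nil => simp [isVaildWordsLoop]
  | cons w rest ih => simp [isVaildWordsLoop, ih]

theorem min_eq_max_iff (ys : List Int) (hne : ys ≠ []) :
    (PySem.List.min? ys (fun x => x) = PySem.List.max? ys (fun x => x)) ↔
      ∀ a ∈ ys, ∀ b ∈ ys, a = b := by
  obtain ⟨m, hm⟩ : ∃ m, PySem.List.min? ys (fun x => x) = some m := by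
    cases h : PySem.List.min? ys (fun x => x) with
    | none => exact absurd ((PySem.List.min?_eq_none_iff _ _).1 h) hne
    | some m => exact ⟨m, rfl⟩
  obtain ⟨M, hM⟩ : ∃ M, PySem.List.max? ys (fun x => x) = some M := by
    cases h : PySem.List.max? ys (fun x => x) with
    | none => exact absurd ((PySem.List.max?_eq_none_iff _ _).1 h) hne
    | some M => exact ⟨M, rfl⟩
  rw [hm, hM]
  constructor
  · intro h a ha b hb
    have hmM : m = M := by simpa using h
    have h1 := PySem.List.min?_isMin hm a ha
    have h2 := PySem.List.max?_isMax hM a ha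
    have h3 := PySem.List.min?_isMin hm b hb
    have h4 := PySem.List.max?_isMax hM b hb
    simp only at h1 h2 h3 h4
    omega
  · intro h
    have hmem := PySem.List.min?_mem hm
    have hMem := PySem.List.max?_mem hM
    rw [h m hmem M hMem]

-- ===== VERDICT (by name: the statement is the Claim_ definition above) =====
theorem isVaildWords_spec : Claim_equal_isVaildWords := by
  intro words _
  unfold Spec_isVaildWords isVaildWords isVaildWords_alt
  match words with
  | [] => simp
  | w :: rest =>
    simp only [List.isEmpty_cons, if_neg Bool.false_ne_true, List.headD_cons]
    rw [Bool.eq_iff_iff, isVaildWordsLoop_iff, decide_eq_true_iff,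
      min_eq_max_iff _ (by simp)]
    constructor
    · intro h a ha b hb
      simp only [List.mem_map] at ha hb
      obtain ⟨wa, hwa, rfl⟩ := ha
      obtain ⟨wb, hwb, rfl⟩ := hb
      rw [h wa hwa, h wb hwb]
    · intro h x hx
      exact h (PySem.Str.len x) (List.mem_map_of_mem hx)
        (PySem.Str.len w) (List.mem_map_of_mem (by simp))
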